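-- pv_equiv track=rewrite | github.com/penquinspecz/job-intelligence-engine | build/lib/jobintel/ai_insights.py | _count_signals
-- ===== SOURCE A (Python) =====
-- from typing import Any, Dict, List, Optional, Tuple
--
-- def _count_signals(jobs: List[Dict[str, Any]], field: str) -> List[Tuple[str, int]]:
--     counts: Dict[str, int] = {}
--     for job in jobs:
--         signals = job.get(field) or []
--         if not isinstance(signals, list):
--             continue
--         for sig in signals:
--             key = str(sig).strip()
--             if not key:
--                 continue
--             counts[key] = counts.get(key, 0) + 1
--     return sorted(counts.items(), key=lambda item: (-item[1], item[0]))
-- ===== SOURCE B (Python) =====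
-- from typing import Any, Dict, List, Optional, Tuple
--
-- def _count_signals(jobs: List[Dict[str, Any]], field: str) -> List[Tuple[str, int]]:
--     # Sort-then-group aggregation instead of hash counting.
--     keys: List[str] = []
--     for job in jobs:
--         signals = job.get(field) or []
--         if not isinstance(signals, list):
--             continue
--         for sig in signals:
--             key = str(sig).strip()
--             if key:
--                 keys.append(key)
--     keys.sort()
--     pairs: List[Tuple[str, int]] = []
--     i, n = 0, len(keys)
--     while i < n:
--         j = i
--         while j < n and keys[j] == keys[i]:
--             j += 1
--         pairs.append((keys[i], j - i))
--         i = j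
--     return sorted(pairs, key=lambda it: (-it[1], it[0]))
-- ===== Notes on version B (the rewrite author's own statement) =====
-- stated objective: alternative
-- what changed: Replaces the hash-dict counting pass with sort-then-group aggregation: all valid normalized keys are collected into a flat list, sorted, runs of equal keys are grouped into (key, run-length) pairs, and the pairs are re-sorted by (-count, key).
import Mathlib
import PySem

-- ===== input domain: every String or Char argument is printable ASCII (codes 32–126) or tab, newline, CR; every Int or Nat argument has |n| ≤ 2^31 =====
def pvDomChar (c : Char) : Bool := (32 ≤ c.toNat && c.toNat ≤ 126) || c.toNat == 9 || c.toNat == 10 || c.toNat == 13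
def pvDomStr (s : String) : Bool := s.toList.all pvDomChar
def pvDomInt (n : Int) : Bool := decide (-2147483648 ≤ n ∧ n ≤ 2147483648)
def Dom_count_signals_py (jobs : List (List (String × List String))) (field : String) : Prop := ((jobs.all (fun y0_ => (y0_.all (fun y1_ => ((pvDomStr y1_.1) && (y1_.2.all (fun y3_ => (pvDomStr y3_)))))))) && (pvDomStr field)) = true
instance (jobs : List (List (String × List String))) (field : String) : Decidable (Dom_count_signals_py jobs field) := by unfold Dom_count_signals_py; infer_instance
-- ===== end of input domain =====

-- B replaces A's hash-dict counting with sort-then-group aggregation of the flat key list; same return value, similar cost.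


-- ===== PORT A =====
-- literal transliteration of A: build a dict of counts, then sort items by (-count, key).
-- 'if not isinstance(signals, list): continue' can never fire here: the values are lists by type.
def count_signals_py (jobs : List (List (String × List String))) (field : String) : List (String × Int) :=
  let counts : PySem.Dict String Int :=
    jobs.foldl (fun counts job =>
      let signals := ((PySem.Dict.mk job).get? field).getD []   -- job.get(field) or []
      signals.foldl (fun counts sig =>
        let key := PySem.Str.strip sig                           -- str(sig) is the identity on a str
        if key = "" then counts
        else counts.insert key (counts.getD key 0 + 1)) counts)
      PySem.Dict.empty
  PySem.List.sorted2 counts.items (fun item => -item.2) (fun item => item.1)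

-- ===== PORT B =====
-- B-side helper: the run-grouping while-loop of Source B (scan a maximal run of equal keys, emit (key, run length)).
def pvRunGroups : List String → List (String × Int)
  | [] => []
  | k :: rest =>
      (k, ((rest.takeWhile (fun x => x == k)).length : Int) + 1) ::
        pvRunGroups (rest.dropWhile (fun x => x == k))
  termination_by s => s.length
  decreasing_by simp only [List.length_cons]; exact Nat.lt_succ_of_le (List.length_dropWhile_le _ _)

def count_signals_py_alt (jobs : List (List (String × List String))) (field : String) : List (String × Int) :=
  let keys : List String :=
    jobs.foldl (fun acc job =>
      let signals := ((PySem.Dict.mk job).get? field).getD []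
      signals.foldl (fun acc sig =>
        let key := PySem.Str.strip sig
        if key = "" then acc else acc ++ [key]) acc) []
  let sortedKeys := PySem.List.sorted keys (fun x => x)
  let pairs := pvRunGroups sortedKeys
  PySem.List.sorted2 pairs (fun item => -item.2) (fun item => item.1)

-- ===== PRECONDITION & SPEC =====
def Spec_count_signals_py (jobs : List (List (String × List String))) (field : String) (out : List (String × Int)) : Prop := out = count_signals_py_alt jobs field
instance (jobs : List (List (String × List String))) (field : String) (out : List (String × Int)) : Decidable (Spec_count_signals_py jobs field out) := by unfold Spec_count_signals_py; infer_instance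

-- ===== CLAIM (what is proved, stated in full; the proofs are below) =====
def Claim_equal_count_signals_py : Prop := ∀ (jobs : List (List (String × List String))) (field : String), Dom_count_signals_py jobs field → Spec_count_signals_py jobs field (count_signals_py jobs field)

-- ===== LEMMAS AND PROOFS =====

-- the flat list of valid normalized keys, in scan order (proof-side characterisation of both loops)
def pvF (sig : String) : Option String :=
  let key := PySem.Str.strip sig
  if key = "" then none else some key

def pvKeysOf (jobs : List (List (String × List String))) (field : String) : List String :=
  jobs.flatMap (fun job => (((PySem.Dict.mk job).get? field).getD []).filterMap pvF)

-- the first element of each run (proof-side skeleton of pvRunGroups)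
def pvHeads : List String → List String
  | [] => []
  | k :: rest => k :: pvHeads (rest.dropWhile (fun x => x == k))
  termination_by s => s.length
  decreasing_by simp only [List.length_cons]; exact Nat.lt_succ_of_le (List.length_dropWhile_le _ _)

-- ---- A's nested loop builds Counter(pvKeysOf jobs field) ----
lemma innerA (sigs : List String) (d : PySem.Dict String Int) :
    sigs.foldl (fun counts sig =>
        let key := PySem.Str.strip sig
        if key = "" then counts
        else counts.insert key (counts.getD key 0 + 1)) d
      = (sigs.filterMap pvF).foldl (fun d x => d.insert x (d.getD x 0 + 1)) d := by
  induction sigs generalizing d with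
  | nil => rfl
  | cons s t ih =>
      rw [List.foldl_cons, List.filterMap_cons]
      by_cases h : PySem.Str.strip s = ""
      · rw [show pvF s = none from by simp [pvF, h]]
        simpa [h] using ih d
      · rw [show pvF s = some (PySem.Str.strip s) from by simp [pvF, h]]
        simpa [h] using ih (d.insert (PySem.Str.strip s) (d.getD (PySem.Str.strip s) 0 + 1))

lemma outerA (jobs : List (List (String × List String))) (field : String)
    (d : PySem.Dict String Int) :
    jobs.foldl (fun counts job =>
        let signals := ((PySem.Dict.mk job).get? field).getD []
        signals.foldl (fun counts sig =>
          let key := PySem.Str.strip sig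
          if key = "" then counts
          else counts.insert key (counts.getD key 0 + 1)) counts) d
      = (pvKeysOf jobs field).foldl (fun d x => d.insert x (d.getD x 0 + 1)) d := by
  induction jobs generalizing d with
  | nil => rfl
  | cons j t ih =>
      simp only [List.foldl_cons, pvKeysOf, List.flatMap_cons, List.foldl_append]
      rw [innerA, ih]
      rfl

-- ---- B's nested loop appends exactly pvKeysOf jobs field ----
lemma innerB (sigs : List String) (acc : List String) :
    sigs.foldl (fun acc sig =>
        let key := PySem.Str.strip sig
        if key = "" then acc else acc ++ [key]) acc
      = acc ++ sigs.filterMap pvF := by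
  induction sigs generalizing acc with
  | nil => simp
  | cons s t ih =>
      rw [List.foldl_cons, List.filterMap_cons]
      by_cases h : PySem.Str.strip s = ""
      · rw [show pvF s = none from by simp [pvF, h]]
        simpa [h] using ih acc
      · rw [show pvF s = some (PySem.Str.strip s) from by simp [pvF, h]]
        simpa [h] using ih (acc ++ [PySem.Str.strip s])

lemma outerB (jobs : List (List (String × List String))) (field : String) (acc : List String) :
    jobs.foldl (fun acc job =>
        let signals := ((PySem.Dict.mk job).get? field).getD []
        signals.foldl (fun acc sig =>
          let key := PySem.Str.strip sig
          if key = "" then acc else acc ++ [key]) acc) acc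
      = acc ++ pvKeysOf jobs field := by
  induction jobs generalizing acc with
  | nil => simp [pvKeysOf]
  | cons j t ih =>
      simp only [List.foldl_cons, pvKeysOf, List.flatMap_cons]
      rw [innerB, ih, List.append_assoc]; rfl

-- ---- run-grouping of a (≤)-sorted list ----
lemma not_mem_dropWhile_of_sorted (k : String) (rest : List String)
    (h : (k :: rest).Pairwise (· ≤ ·)) : k ∉ rest.dropWhile (fun x => x == k) := by
  induction rest with
  | nil => simp
  | cons x xs ih =>
      by_cases hx : x = k
      · subst hx
        rw [List.dropWhile_cons_of_pos (by simp)]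
        exact ih (h.sublist ((List.sublist_cons_self x xs).cons_cons x))
      · have hkx : k ≤ x := (List.pairwise_cons.1 h).1 x (by simp)
        have hp : (x :: xs).Pairwise (· ≤ ·) := (List.pairwise_cons.1 h).2
        rw [List.dropWhile_cons_of_neg (by simp [hx])]
        intro hmem
        rcases List.mem_cons.1 hmem with h1 | h1
        · exact hx h1.symm
        · have : x ≤ k := (List.pairwise_cons.1 hp).1 k h1
          exact hx (le_antisymm this hkx)

lemma mem_heads_sub (s : List String) : ∀ x ∈ pvHeads s, x ∈ s := by
  induction s using pvHeads.induct with
  | case1 => simp [pvHeads]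
  | case2 k rest ih =>
      intro x hx
      rw [pvHeads] at hx
      rcases List.mem_cons.1 hx with h | h
      · simp [h]
      · exact List.mem_cons_of_mem _ ((List.dropWhile_sublist (fun x => x == k)).mem (ih x h))

lemma heads_nodup_mem (s : List String) (hs : s.Pairwise (· ≤ ·)) :
    (pvHeads s).Nodup ∧ ∀ x, (x ∈ pvHeads s ↔ x ∈ s) := by
  induction s using pvHeads.induct with
  | case1 => simp [pvHeads]
  | case2 k rest ih =>
      have hsub : (rest.dropWhile (fun x => x == k)).Sublist (k :: rest) :=
        (List.dropWhile_sublist (fun x => x == k)).trans (List.sublist_cons_self _ _)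
      have hd : (rest.dropWhile (fun x => x == k)).Pairwise (· ≤ ·) := hs.sublist hsub
      obtain ⟨hnd, hmem⟩ := ih hd
      have hknot : k ∉ rest.dropWhile (fun x => x == k) := not_mem_dropWhile_of_sorted k rest hs
      constructor
      · rw [pvHeads]
        exact List.nodup_cons.2 ⟨fun h => hknot ((hmem k).1 h), hnd⟩
      · intro x
        rw [pvHeads]
        simp only [List.mem_cons, hmem x]
        constructor
        · rintro (h | h)
          · exact Or.inl h
          · exact Or.inr ((List.dropWhile_sublist (fun x => x == k)).mem h)
        · rintro (h | h)
          · exact Or.inl h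
          · by_cases hxk : x = k
            · exact Or.inl hxk
            · right
              have : rest = rest.takeWhile (fun x => x == k) ++ rest.dropWhile (fun x => x == k) :=
                (List.takeWhile_append_dropWhile).symm
              rw [this] at h
              rcases List.mem_append.1 h with h1 | h1
              · exact absurd (by simpa using List.mem_takeWhile_imp h1) hxk
              · exact h1

lemma count_takeWhile_eq (k : String) (rest : List String) :
    (rest.takeWhile (fun x => x == k)).count k = (rest.takeWhile (fun x => x == k)).length :=
  List.count_eq_length.2 (fun b hb => (show b = k by simpa using List.mem_takeWhile_imp hb).symm)

lemma runGroups_spec (s : List String) (hs : s.Pairwise (· ≤ ·)) :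
    pvRunGroups s = (pvHeads s).map (fun k => (k, (s.count k : Int))) := by
  induction s using pvRunGroups.induct with
  | case1 => simp [pvRunGroups, pvHeads]
  | case2 k rest ih =>
      have hsub : (rest.dropWhile (fun x => x == k)).Sublist (k :: rest) :=
        (List.dropWhile_sublist (fun x => x == k)).trans (List.sublist_cons_self _ _)
      have hd : (rest.dropWhile (fun x => x == k)).Pairwise (· ≤ ·) := hs.sublist hsub
      have hknot : k ∉ rest.dropWhile (fun x => x == k) := not_mem_dropWhile_of_sorted k rest hs
      have hsplit : rest = rest.takeWhile (fun x => x == k) ++ rest.dropWhile (fun x => x == k) :=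
        (List.takeWhile_append_dropWhile).symm
      rw [pvRunGroups, pvHeads, List.map_cons, ih hd]
      congr 1
      · -- head pair: count k s = run length + 1
        have : (k :: rest).count k =
            (rest.takeWhile (fun x => x == k)).length + 1 := by
          conv_lhs => rw [hsplit, ← List.cons_append]
          rw [List.count_append, List.count_cons_self, count_takeWhile_eq,
            List.count_eq_zero.2 hknot]
        simp [this]
      · -- tail: counts in the dropped suffix agree with counts in s
        apply List.map_congr_left
        intro x hx
        have hxd : x ∈ rest.dropWhile (fun x => x == k) := mem_heads_sub _ x hx
        have hxk : x ≠ k := fun h => hknot (h ▸ hxd)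
        have hxt : x ∉ rest.takeWhile (fun x => x == k) := fun h =>
          hxk (by simpa using List.mem_takeWhile_imp h)
        have : (k :: rest).count x = (rest.dropWhile (fun x => x == k)).count x := by
          conv_lhs => rw [hsplit, ← List.cons_append]
          rw [List.count_append, List.count_cons_of_ne hxk.symm, List.count_eq_zero.2 hxt]
          omega
        simp [this]

-- ---- the final sort: sorted2 with key pair (-count, key) is sorted with the lex key ----
lemma sorted2_eq_sorted_lex (xs : List (String × Int)) :
    PySem.List.sorted2 xs (fun item => -item.2) (fun item => item.1)
      = PySem.List.sorted xs (fun item => toLex (-item.2, item.1)) := by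
  show List.foldl _ [] xs = List.foldl _ [] xs
  congr 1
  funext acc x
  congr 1
  funext a b
  show (decide ((-a.2 : Int) < -b.2) || (!decide ((-b.2 : Int) < -a.2) && decide (a.1 < b.1)))
      = decide (toLex ((-a.2 : Int), a.1) < toLex ((-b.2 : Int), b.1))
  rcases lt_trichotomy (-a.2 : Int) (-b.2) with h | h | h
  · simp [Prod.Lex.lt_iff, h]
  · simp [Prod.Lex.lt_iff, h]
  · simp [Prod.Lex.lt_iff, h, h.ne', lt_asymm h]

lemma lexKey_injective : Function.Injective (fun item : String × Int => toLex (-item.2, item.1)) := by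
  intro a b h
  have := toLex.injective h
  have h1 : (-a.2 : Int) = -b.2 := congrArg Prod.fst this
  have h2 : a.1 = b.1 := congrArg Prod.snd this
  exact Prod.ext h2 (by omega)

-- ===== VERDICT (by name: the statement is the Claim_ definition above) =====
theorem count_signals_py_spec : Claim_equal_count_signals_py := by
  intro jobs field _
  show count_signals_py jobs field = count_signals_py_alt jobs field
  set L := pvKeysOf jobs field with hL
  set g : String → String × Int := fun k => (k, (L.count k : Int)) with hg
  -- A side
  have hA : count_signals_py jobs field
      = PySem.List.sorted2 ((PySem.Set.ofList L).map g) (fun item => -item.2) (fun item => item.1) := by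
    simp only [count_signals_py]
    rw [outerA, PySem.Dict.foldl_insert_getD_add_one_eq_counter, PySem.Dict.items_counter]
  -- B side
  have hsorted : (PySem.List.sorted L (fun x => x)).Pairwise (· ≤ ·) := by
    simpa using PySem.List.sorted_pairwise L (fun x => x)
  have hperm : (PySem.List.sorted L (fun x => x)).Perm L := PySem.List.sorted_perm L _ _
  have hB : count_signals_py_alt jobs field
      = PySem.List.sorted2 ((pvHeads (PySem.List.sorted L (fun x => x))).map g)
          (fun item => -item.2) (fun item => item.1) := by
    simp only [count_signals_py_alt]
    rw [outerB, List.nil_append, runGroups_spec _ hsorted]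
    congr 1
    apply List.map_congr_left
    intro x _
    simp [hg, hperm.count_eq x]
  -- the two pair lists are permutations of each other
  obtain ⟨hnd, hmem⟩ := heads_nodup_mem _ hsorted
  have hkeysperm : (PySem.Set.ofList L).Perm (pvHeads (PySem.List.sorted L (fun x => x))) :=
    (List.perm_ext_iff_of_nodup (PySem.Set.nodup_ofList L) hnd).2
      (fun a => by rw [PySem.Set.mem_ofList, hmem a, List.Perm.mem_iff hperm])
  rw [hA, hB, sorted2_eq_sorted_lex, sorted2_eq_sorted_lex]
  exact PySem.List.sorted_eq_sorted_of_perm _ _ _ lexKey_injective (hkeysperm.map g)
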